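-- pv_equiv track=rewrite | github.com/Peaceandmaths/Programming-project | P3.py | Exception_ACTG_
-- ===== SOURCE A (Python) =====
-- def Exception_ACTG_(string):
--     """Checks if the nucleotides string only contains allowed characters
--     input : string, sequence of nucleotides with gaps
--     output: True if there's malformed input, False if everything is ok"""
--     counter_errors = 0
--     for letter in string:
--         if letter not in ['A', 'a', 'c', 'C', 'T', 't', 'g', 'G', '-'] or not type(letter) == str:
--             counter_errors += 1
--             return True
--         else:
--             counter_errors = 0
--     if counter_errors == 0:
--         return False
-- ===== SOURCE B (Python) =====
-- def Exception_ACTG_(string):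
--     """Checks if the nucleotides string only contains allowed characters
--     input : string, sequence of nucleotides with gaps
--     output: True if there's malformed input, False if everything is ok"""
--     return bool(set(string) - set('AacCTtgG-'))
-- ===== Notes on version B (the rewrite author's own statement) =====
-- stated objective: idiomatic
-- what changed: Replaces the character-by-character early-exit loop (with a dead error counter and dead type check) by a single set-difference: distinct characters of the input minus the allowed alphabet, truth-tested.
import Mathlib
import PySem

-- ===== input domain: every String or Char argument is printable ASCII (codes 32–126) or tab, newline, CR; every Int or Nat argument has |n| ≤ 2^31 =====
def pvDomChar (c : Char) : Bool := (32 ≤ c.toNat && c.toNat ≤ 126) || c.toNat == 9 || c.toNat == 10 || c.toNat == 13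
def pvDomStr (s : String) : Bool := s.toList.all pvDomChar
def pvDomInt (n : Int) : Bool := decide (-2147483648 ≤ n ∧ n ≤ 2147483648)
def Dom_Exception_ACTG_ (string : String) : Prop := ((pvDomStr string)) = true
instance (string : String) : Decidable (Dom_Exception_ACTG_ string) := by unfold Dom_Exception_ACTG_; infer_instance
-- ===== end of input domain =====

-- B replaces A's early-exit per-character loop by one set difference (distinct chars minus the allowed alphabet); idiomatic, same cost.

-- ===== PORT A =====
-- A's loop: early return True on a disallowed character (the 'type(letter)==str' clause is
-- always false-negated, i.e. dead, since iterating a str yields str), carrying the counter.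
def pvALoop : List Char → Int → Bool
  | [], counter => if counter = 0 then false else false  -- A returns False (counter is always 0 here); else-branch unreachable: Python falls off returning None only if counter ≠ 0, which never happens
  | c :: rest, _ =>
    if c ∉ ['A', 'a', 'c', 'C', 'T', 't', 'g', 'G', '-'] then true
    else pvALoop rest 0

def Exception_ACTG_ (string : String) : Bool := pvALoop string.toList 0

-- ===== PORT B =====
def Exception_ACTG__alt (string : String) : Bool :=
  !(PySem.Set.diff (PySem.Set.ofList string.toList)
      (PySem.Set.ofList "AacCTtgG-".toList)).isEmpty

-- ===== PRECONDITION & SPEC =====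
def Spec_Exception_ACTG_ (string : String) (out : Bool) : Prop := out = Exception_ACTG__alt string
instance (string : String) (out : Bool) : Decidable (Spec_Exception_ACTG_ string out) := by unfold Spec_Exception_ACTG_; infer_instance

-- ===== CLAIM (what is proved, stated in full; the proofs are below) =====
def Claim_equal_Exception_ACTG_ : Prop := ∀ (string : String), Dom_Exception_ACTG_ string → Spec_Exception_ACTG_ string (Exception_ACTG_ string)

-- ===== LEMMAS AND PROOFS =====
lemma pvALoop_eq_any (l : List Char) (c0 : Int) :
    pvALoop l c0 = l.any (fun c => c ∉ ['A', 'a', 'c', 'C', 'T', 't', 'g', 'G', '-']) := by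
  induction l generalizing c0 with
  | nil => simp [pvALoop]
  | cons c rest ih =>
    simp only [pvALoop, List.any_cons]
    split_ifs with h <;> simp [h, ih]

lemma alt_eq_any (string : String) :
    Exception_ACTG__alt string
      = string.toList.any (fun c => c ∉ ['A', 'a', 'c', 'C', 'T', 't', 'g', 'G', '-']) := by
  unfold Exception_ACTG__alt
  cases h : (PySem.Set.diff (PySem.Set.ofList string.toList)
      (PySem.Set.ofList "AacCTtgG-".toList)).isEmpty with
  | false =>
    -- diff nonempty: some char of the string is outside the alphabet
    rw [List.isEmpty_eq_false_iff_exists_mem] at h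
    obtain ⟨c, hc⟩ := h
    rw [PySem.Set.mem_diff, PySem.Set.mem_ofList, PySem.Set.mem_ofList] at hc
    exact (List.any_eq_true.mpr ⟨c, hc.1, by simpa using hc.2⟩).symm
  | true =>
    -- diff empty: every char of the string is in the alphabet
    rw [List.isEmpty_iff, List.eq_nil_iff_forall_not_mem] at h
    refine (List.any_eq_false.mpr ?_).symm
    intro c hc
    by_contra hne
    exact h c (by
      rw [PySem.Set.mem_diff, PySem.Set.mem_ofList, PySem.Set.mem_ofList]
      exact ⟨hc, by simpa using hne⟩)

-- ===== VERDICT (by name: the statement is the Claim_ definition above) =====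
theorem Exception_ACTG__spec : Claim_equal_Exception_ACTG_ := by
  intro string _
  unfold Spec_Exception_ACTG_ Exception_ACTG_
  rw [pvALoop_eq_any, alt_eq_any]
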